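-- pv_equiv track=rewrite | github.com/shadowkiller33/Livermore | livermore/metrics/lingfeng.py | barslast
-- ===== SOURCE A (Python) =====
-- def barslast(cond_arr, i):
--     """
--     BARSLAST(cond):
--       Returns the distance (in bars) from the current bar i
--       to the most recent bar where cond_arr was True.
--       If not found, return i+1 (i.e. a large number).
--     """
--     for dist in range(0, i+1):
--         idx = i - dist
--         if idx < 0:
--             break
--         if cond_arr[idx]:
--             return dist
--     return i + 1
-- ===== SOURCE B (Python) =====
-- def barslast(cond_arr, i):
--     # Forward scan: remember the most recent True index up to i, no early exit.
--     last = -1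
--     for idx in range(0, i + 1):
--         if cond_arr[idx]:
--             last = idx
--     return i - last if last != -1 else i + 1
-- ===== Notes on version B (the rewrite author's own statement) =====
-- stated objective: alternative
-- what changed: Replaces A's backward early-exit search from bar i with a single forward scan that maintains a 'last True index' accumulator and computes the distance afterwards.
import Mathlib
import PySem

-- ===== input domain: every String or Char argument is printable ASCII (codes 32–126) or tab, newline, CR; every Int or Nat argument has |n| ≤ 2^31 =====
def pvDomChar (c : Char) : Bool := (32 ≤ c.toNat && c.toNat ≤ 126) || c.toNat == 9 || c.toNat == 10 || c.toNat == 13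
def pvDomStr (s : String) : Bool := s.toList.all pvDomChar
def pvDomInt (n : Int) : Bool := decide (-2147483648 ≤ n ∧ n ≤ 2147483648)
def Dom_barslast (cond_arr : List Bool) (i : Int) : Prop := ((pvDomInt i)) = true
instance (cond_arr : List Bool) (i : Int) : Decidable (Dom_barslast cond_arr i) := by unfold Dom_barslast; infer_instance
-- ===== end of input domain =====

-- B replaces A's backward early-exit search with a forward scan keeping a
-- 'last True index' accumulator; same return values, an alternative decomposition.

-- ===== PORT A =====
-- A's loop state: Sum.inl d = "return d happened", Sum.inr true = "break happened".
def stepA (cond_arr : List Bool) (i : Int) (st : Int ⊕ Bool) (dist : Int) : Int ⊕ Bool :=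
  match st with
  | Sum.inl d => Sum.inl d
  | Sum.inr brk =>
    if brk then Sum.inr true
    else
      let idx := i - dist
      if idx < 0 then Sum.inr true
      else if PySem.List.pyGetD cond_arr idx false then Sum.inl dist
      else Sum.inr false

def barslast (cond_arr : List Bool) (i : Int) : Int :=
  match (PySem.List.pyRange 0 (i + 1) 1).foldl (stepA cond_arr i) (Sum.inr false) with
  | Sum.inl d => d
  | Sum.inr _ => i + 1

-- ===== PORT B =====
def stepB (cond_arr : List Bool) (last idx : Int) : Int :=
  if PySem.List.pyGetD cond_arr idx false then idx else last

def barslast_alt (cond_arr : List Bool) (i : Int) : Int :=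
  let last := (PySem.List.pyRange 0 (i + 1) 1).foldl (stepB cond_arr) (-1)
  if last ≠ -1 then i - last else i + 1

-- ===== PRECONDITION & SPEC =====
-- Pre_ excludes exactly the inputs where the Python A raises IndexError (i ≥ len(cond_arr)).
def Pre_barslast (cond_arr : List Bool) (i : Int) : Prop := i < (cond_arr.length : Int)
instance (cond_arr : List Bool) (i : Int) : Decidable (Pre_barslast cond_arr i) := by
  unfold Pre_barslast; infer_instance

def pvWitness_barslast : List Bool × Int := ([false, true, false], 2)

def Spec_barslast (cond_arr : List Bool) (i : Int) (out : Int) : Prop := out = barslast_alt cond_arr i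
instance (cond_arr : List Bool) (i : Int) (out : Int) : Decidable (Spec_barslast cond_arr i out) := by
  unfold Spec_barslast; infer_instance

-- ===== CLAIM (what is proved, stated in full; the proofs are below) =====
def Claim_equal_barslast : Prop := ∀ (cond_arr : List Bool) (i : Int), Dom_barslast cond_arr i → Pre_barslast cond_arr i → Spec_barslast cond_arr i (barslast cond_arr i)

-- ===== LEMMAS AND PROOFS =====

-- the common value both loops compute: the largest index j < m with cond_arr.getD j = true, else -1
def lastB (l : List Bool) : Nat → Int
  | 0 => -1
  | m + 1 => if l.getD m false then (m : Int) else lastB l m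

theorem foldB_eq (l : List Bool) (m : Nat) :
    (PySem.List.pyRange 0 (m : Int) 1).foldl (stepB l) (-1) = lastB l m := by
  induction m with
  | zero => simp [lastB]
  | succ m ih =>
    have : ((m : Int) + 1) = ((m + 1 : Nat) : Int) := by push_cast; ring
    rw [lastB, ← this, PySem.List.pyRange_one_succ_right (by positivity),
        List.foldl_append, ih]
    simp [stepB]

theorem foldA_inl (l : List Bool) (i d : Int) (xs : List Int) :
    xs.foldl (stepA l i) (Sum.inl d) = Sum.inl d := by
  induction xs with
  | nil => rfl
  | cons x xs ih => simp [List.foldl, stepA, ih]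

theorem foldA_eq (l : List Bool) (i : Int) (m : Nat) (hm : (m : Int) ≤ i + 1) :
    (PySem.List.pyRange (i + 1 - (m : Int)) (i + 1) 1).foldl (stepA l i) (Sum.inr false) =
      (if lastB l m = -1 then Sum.inr false else Sum.inl (i - lastB l m)) := by
  induction m with
  | zero => simp [PySem.List.pyRange_one_eq_nil le_rfl, lastB]
  | succ m ih =>
    have hlt : i + 1 - ((m + 1 : Nat) : Int) < i + 1 := by push_cast; omega
    rw [PySem.List.pyRange_one_cons hlt]
    have harg : i + 1 - ((m + 1 : Nat) : Int) + 1 = i + 1 - (m : Int) := by push_cast; ring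
    rw [List.foldl_cons, harg]
    have hstep : stepA l i (Sum.inr false) (i + 1 - ((m + 1 : Nat) : Int)) =
        (if l.getD m false then Sum.inl (i - (m : Int)) else Sum.inr false) := by
      have hidx : i - (i + 1 - ((m + 1 : Nat) : Int)) = (m : Int) := by push_cast; ring
      simp only [stepA, hidx, Bool.false_eq_true, if_false]
      rw [if_neg (by omega : ¬ (m : Int) < 0), PySem.List.pyGetD_natCast,
          (by push_cast; ring : i + 1 - ((m + 1 : Nat) : Int) = i - (m : Int))]
    rw [hstep]
    by_cases hc : l.getD m false
    · rw [if_pos hc, foldA_inl]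
      have : lastB l (m + 1) = (m : Int) := by rw [lastB, if_pos hc]
      rw [this]
      have : ((m : Int)) ≠ -1 := by omega
      simp [this]
    · rw [if_neg hc, ih (by push_cast at hm ⊢; omega)]
      have : lastB l (m + 1) = lastB l m := by rw [lastB, if_neg hc]
      rw [this]

theorem barslast_eq_alt (cond_arr : List Bool) (i : Int) :
    barslast cond_arr i = barslast_alt cond_arr i := by
  by_cases hi : 0 ≤ i
  · have hm : (((i + 1).toNat : Nat) : Int) = i + 1 := Int.toNat_of_nonneg (by omega)
    have hA := foldA_eq cond_arr i (i + 1).toNat (by omega)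
    have hB := foldB_eq cond_arr (i + 1).toNat
    rw [hm] at hA hB
    have harg : i + 1 - (i + 1) = (0 : Int) := by ring
    rw [harg] at hA
    unfold barslast barslast_alt
    rw [hA, hB]
    by_cases hl : lastB cond_arr (i + 1).toNat = -1
    · simp [hl]
    · simp [hl]
  · have : i + 1 ≤ 0 := by omega
    unfold barslast barslast_alt
    rw [PySem.List.pyRange_one_eq_nil this]
    simp

-- ===== VERDICT (by name: the statement is the Claim_ definition above) =====
theorem barslast_spec : Claim_equal_barslast := by
  intro cond_arr i _ _
  unfold Spec_barslast
  exact barslast_eq_alt cond_arr i
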